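-- pv_equiv track=rewrite | github.com/mariamayer/chuko-backend | lib/pricing.py | _closest_lower_color
-- ===== SOURCE A (Python) =====
-- _COLOR_ORDER = ["1", "2", "3+", "full"]
--
-- def _closest_lower_color(wanted: str, available: list[str]) -> str | None:
--     """Return the highest color tier in *available* that is ≤ *wanted*."""
--     order = _COLOR_ORDER
--     try:
--         wi = order.index(wanted)
--     except ValueError:
--         wi = len(order) - 1
--     for key in reversed(order[: wi + 1]):
--         if key in available:
--             return key
--     # fallback: any available key
--     return available[0] if available else None
-- ===== SOURCE B (Python) =====
-- _COLOR_ORDER = ["1", "2", "3+", "full"]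
--
-- def _closest_lower_color(wanted, available):
--     order = _COLOR_ORDER
--     try:
--         wi = order.index(wanted)
--     except ValueError:
--         wi = len(order) - 1
--     best = None  # (order index, key) of best qualifying element seen so far
--     for key in available:
--         if key in order:
--             i = order.index(key)
--             if i <= wi and (best is None or i > best[0]):
--                 best = (i, key)
--     if best is not None:
--         return best[1]
--     return available[0] if available else None
-- ===== Notes on version B (the rewrite author's own statement) =====
-- stated objective: alternative
-- what changed: Instead of scanning the color order from the wanted index downward and testing membership of each tier in available, B makes a single argmax pass over available, tracking the qualifying element (order index <= wanted's index) with the largest order index.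
import Mathlib
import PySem

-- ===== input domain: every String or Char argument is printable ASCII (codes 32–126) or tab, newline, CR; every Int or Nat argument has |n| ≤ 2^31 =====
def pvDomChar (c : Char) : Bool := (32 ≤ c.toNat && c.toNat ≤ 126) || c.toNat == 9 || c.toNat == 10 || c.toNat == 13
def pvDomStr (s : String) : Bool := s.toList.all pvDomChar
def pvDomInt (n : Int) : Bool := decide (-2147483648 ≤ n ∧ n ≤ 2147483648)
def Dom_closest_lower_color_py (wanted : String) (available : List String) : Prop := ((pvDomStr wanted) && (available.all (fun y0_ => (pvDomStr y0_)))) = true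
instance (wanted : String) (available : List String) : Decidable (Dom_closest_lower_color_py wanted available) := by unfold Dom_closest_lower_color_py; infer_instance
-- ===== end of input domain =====

-- B differs from A by a single argmax pass over `available` instead of a downward
-- membership scan over the color order; same return value everywhere (alternative decomposition).

-- _COLOR_ORDER
def pvOrder : List String := ["1", "2", "3+", "full"]

-- wi = order.index(wanted) with 'except ValueError: wi = len(order) - 1'
-- (shared by A and B, which compute it by identical code)
def pvWi (wanted : String) : Nat :=
  match PySem.List.index? pvOrder wanted with
  | some i => i
  | none => pvOrder.length - 1

-- ===== PORT A =====
-- 'for key in reversed(order[: wi + 1]): if key in available: return key'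
def pvScanA : List String → List String → Option String
  | [], _ => none
  | k :: ks, available => if k ∈ available then some k else pvScanA ks available

def closest_lower_color_py (wanted : String) (available : List String) : Option String :=
  -- order[: wi + 1] with 0 ≤ wi + 1 is exactly List.take (wi + 1)
  match pvScanA ((pvOrder.take (pvWi wanted + 1)).reverse) available with
  | some k => some k
  | none => available.head?   -- 'available[0] if available else None'

-- ===== PORT B =====
-- one loop step: 'if key in order: i = order.index(key); if i <= wi and (best is None or i > best[0]): best = (i, key)'
def pvStepB (wi : Nat) (best : Option (Nat × String)) (key : String) : Option (Nat × String) :=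
  if key ∈ pvOrder then
    match PySem.List.index? pvOrder key with
    | some i =>
      if i ≤ wi then
        match best with
        | none => some (i, key)
        | some b => if b.1 < i then some (i, key) else best
      else best
    | none => best
  else best

def closest_lower_color_py_alt (wanted : String) (available : List String) : Option String :=
  match available.foldl (pvStepB (pvWi wanted)) none with
  | some b => some b.2
  | none => available.head?   -- 'available[0] if available else None'

-- ===== PRECONDITION & SPEC =====
def Spec_closest_lower_color_py (wanted : String) (available : List String) (out : Option String) : Prop := out = closest_lower_color_py_alt wanted available
instance (wanted : String) (available : List String) (out : Option String) : Decidable (Spec_closest_lower_color_py wanted available out) := by unfold Spec_closest_lower_color_py; infer_instance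

-- ===== CLAIM (what is proved, stated in full; the proofs are below) =====
def Claim_equal_closest_lower_color_py : Prop := ∀ (wanted : String) (available : List String), Dom_closest_lower_color_py wanted available → Spec_closest_lower_color_py wanted available (closest_lower_color_py wanted available)

-- ===== LEMMAS AND PROOFS =====

-- 'merge b q' : the better of two candidate (index, key) pairs, ties favouring b
def pvMerge : Option (Nat × String) → Option (Nat × String) → Option (Nat × String)
  | b, none => b
  | none, some s => some s
  | some b, some s => if b.1 < s.1 then some s else some b

-- best qualifying candidate of a list (earlier elements win ties)
def pvBest (wi : Nat) : List String → Option (Nat × String)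
  | [] => none
  | x :: xs => pvMerge (pvStepB wi none x) (pvBest wi xs)

lemma pvStepB_eq_merge (wi : Nat) (b : Option (Nat × String)) (x : String) :
    pvStepB wi b x = pvMerge b (pvStepB wi none x) := by
  unfold pvStepB
  by_cases hx : x ∈ pvOrder
  · simp only [hx, if_true]
    cases hidx : PySem.List.index? pvOrder x with
    | none => cases b <;> simp [pvMerge]
    | some i =>
      by_cases hi : i ≤ wi
      · simp only [hi, if_true]
        cases b with
        | none => simp [pvMerge]
        | some bb => by_cases hlt : bb.1 < i <;> simp [pvMerge, hlt]
      · simp only [hi, if_false]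
        cases b <;> simp [pvMerge]
  · cases b <;> simp [pvMerge, hx]

lemma pvMerge_assoc (a b c : Option (Nat × String)) :
    pvMerge (pvMerge a b) c = pvMerge a (pvMerge b c) := by
  cases a <;> cases b <;> cases c <;>
    simp only [pvMerge] <;> split_ifs <;> simp <;> split_ifs <;> first | rfl | omega

lemma foldl_stepB (wi : Nat) (avail : List String) :
    ∀ b, avail.foldl (pvStepB wi) b = pvMerge b (pvBest wi avail) := by
  induction avail with
  | nil => intro b; cases b <;> simp [pvMerge, pvBest]
  | cons x xs ih =>
    intro b
    simp only [List.foldl_cons, ih, pvBest, pvStepB_eq_merge wi b x, pvMerge_assoc]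

lemma pvWi_le (wanted : String) : pvWi wanted ≤ 3 := by
  unfold pvWi
  cases hidx : PySem.List.index? pvOrder wanted with
  | none => simp [pvOrder]
  | some i =>
    show i ≤ 3
    rcases PySem.List.getElem_of_index?_eq_some hidx with ⟨hk, -, -⟩
    simp only [pvOrder, List.length_cons, List.length_nil] at hk
    omega

set_option maxHeartbeats 2000000 in
-- characterisation of pvBest by the four memberships
lemma pvBest_char (wi : Nat) (_hwi : wi ≤ 3) (avail : List String) :
    pvBest wi avail =
      if 3 ≤ wi ∧ "full" ∈ avail then some (3, "full")
      else if 2 ≤ wi ∧ "3+" ∈ avail then some (2, "3+")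
      else if 1 ≤ wi ∧ "2" ∈ avail then some (1, "2")
      else if "1" ∈ avail then some (0, "1")
      else none := by
  induction avail with
  | nil => simp [pvBest]
  | cons x xs ih =>
    by_cases h1 : x = "1"
    · subst h1
      have hq : pvStepB wi none "1" = some (0, "1") := by
        simp [pvStepB, (by decide : List.idxOf? "1" pvOrder = some 0),
          (by decide : ("1" : String) ∈ pvOrder)]
      simp only [pvBest, hq, ih, List.mem_cons]
      split_ifs <;> simp_all [pvMerge]
    by_cases h2 : x = "2"
    · subst h2
      have hq : pvStepB wi none "2" = if 1 ≤ wi then some (1, "2") else none := by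
        simp [pvStepB, (by decide : List.idxOf? "2" pvOrder = some 1),
          (by decide : ("2" : String) ∈ pvOrder)]
      simp only [pvBest, hq, ih, List.mem_cons]
      split_ifs <;> simp_all [pvMerge]
    by_cases h3 : x = "3+"
    · subst h3
      have hq : pvStepB wi none "3+" = if 2 ≤ wi then some (2, "3+") else none := by
        simp [pvStepB, (by decide : List.idxOf? "3+" pvOrder = some 2),
          (by decide : ("3+" : String) ∈ pvOrder)]
      simp only [pvBest, hq, ih, List.mem_cons]
      split_ifs <;> simp_all [pvMerge]
    by_cases h4 : x = "full"
    · subst h4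
      have hq : pvStepB wi none "full" = if 3 ≤ wi then some (3, "full") else none := by
        simp [pvStepB, (by decide : List.idxOf? "full" pvOrder = some 3),
          (by decide : ("full" : String) ∈ pvOrder)]
      simp only [pvBest, hq, ih, List.mem_cons]
      split_ifs <;> simp_all [pvMerge]
    · have hx : x ∉ pvOrder := by
        simp only [pvOrder, List.mem_cons, List.not_mem_nil, or_false]
        tauto
      have hq : pvStepB wi none x = none := by simp [pvStepB, hx]
      simp only [pvBest, hq, ih, List.mem_cons]
      split_ifs <;> simp_all [pvMerge]

lemma pvMerge_none_left (r : Option (Nat × String)) : pvMerge none r = r := by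
  cases r <;> rfl

-- ===== VERDICT (by name: the statement is the Claim_ definition above) =====
set_option maxHeartbeats 2000000 in
theorem closest_lower_color_py_spec : Claim_equal_closest_lower_color_py := by
  intro wanted available _
  unfold Spec_closest_lower_color_py closest_lower_color_py closest_lower_color_py_alt
  have hwi := pvWi_le wanted
  rw [foldl_stepB, pvBest_char _ hwi, pvMerge_none_left]
  set wi := pvWi wanted with hdef
  clear_value wi
  interval_cases wi <;>
    simp only [pvOrder, List.take_succ_cons, List.take_zero, List.reverse_cons,
      List.reverse_nil, List.nil_append, List.cons_append, pvScanA] <;>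
    split_ifs <;> simp_all <;> omega
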